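-- pv_equiv track=rewrite | github.com/Sim0no/Arenas | Dynammic_programming/abbr.py | abbr
-- ===== SOURCE A (Python) =====
-- def abbr(a,b):
--     if b=='' and a.islower():
--         return 1
--     if a==b=='':
--         return 1
--     if b=='' and not a.islower():
--         return 0
--     if a == '' and b != '':
--         return 0
--
--     if a[0].islower():
--         if a[0].capitalize() == b[0]:
--             return max(abbr(a[1:],b[1:]),abbr(a[1:],b))
--         else:
--             return abbr(a[1:],b)
--
--     else:
--         if a[0] == b[0]:
--             return abbr(a[1:],b[1:])
--         else:
--             return 0
-- ===== SOURCE B (Python) =====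
-- def abbr(a, b):
--     # Bottom-up DP over (i, j) suffix pairs, one row at a time.
--     m = len(b)
--     prev = [0] * m + [1]          # row for the empty suffix of a
--     has_cased = False             # does the current suffix of a contain a cased char?
--     all_low = True                # is every cased char of the current suffix lowercase?
--     for c in reversed(a):
--         if c.isalpha():
--             has_cased = True
--             if c.isupper():
--                 all_low = False
--         last = 1 if (has_cased and all_low) else 0   # b-suffix empty: a-suffix.islower()
--         curr = [(max(p1, p0) if c.capitalize() == d else p0) if c.islower()
--                 else (p1 if c == d else 0)
--                 for d, p0, p1 in zip(b, prev, prev[1:])]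
--         curr.append(last)
--         prev = curr
--     return prev[0]
-- ===== Notes on version B (the rewrite author's own statement) =====
-- stated objective: alternative
-- what changed: Replaced the branching slicing recursion with a bottom-up DP that folds one row of (a-suffix, b-suffix) answers per character of a, tracking the islower flag incrementally.
import Mathlib
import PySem

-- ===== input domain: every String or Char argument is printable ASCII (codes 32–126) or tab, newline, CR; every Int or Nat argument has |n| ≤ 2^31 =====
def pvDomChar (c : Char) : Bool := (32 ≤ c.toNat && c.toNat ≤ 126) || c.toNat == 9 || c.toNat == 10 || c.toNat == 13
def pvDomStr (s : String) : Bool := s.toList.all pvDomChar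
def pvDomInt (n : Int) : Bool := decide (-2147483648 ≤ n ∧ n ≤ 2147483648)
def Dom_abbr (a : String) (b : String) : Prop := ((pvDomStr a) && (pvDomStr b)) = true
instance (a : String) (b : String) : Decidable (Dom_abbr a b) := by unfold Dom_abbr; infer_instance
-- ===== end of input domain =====

-- B replaces A's branching slicing recursion by a bottom-up DP over (a-suffix, b-suffix)
-- pairs, one row per character of a (objective: alternative algorithm, same return value).

-- ===== PORT A =====
-- str.islower(): at least one cased char and no uppercase char (exact for ASCII, where cased = alphabetic)
def pyStrIslower (cs : List Char) : Bool :=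
  cs.any PySem.Chars.isalpha && cs.all (fun c => !PySem.Chars.isupper c)

-- literal transliteration of A's recursion, on List Char
def abbrA : List Char → List Char → Int
  | a, b =>
    if b = [] ∧ pyStrIslower a = true then 1
    else if a = [] ∧ b = [] then 1
    else if b = [] ∧ ¬ pyStrIslower a = true then 0
    else if a = [] ∧ b ≠ [] then 0
    else
      match a, b with
      | c :: ar, d :: br =>
        if PySem.Chars.islower c then
          if PySem.Chars.upperChar c = d then
            max (abbrA ar br) (abbrA ar (d :: br))
          else abbrA ar (d :: br)
        else
          if c = d then abbrA ar br else 0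
      | _, _ => 0   -- unreachable: the guards above cover every case with a = [] or b = []

def abbr (a : String) (b : String) : Int := abbrA a.toList b.toList

-- ===== PORT B =====
-- one entry of the comprehension in Source B
def abbrBEntry (c : Char) (d : Char) (p0 p1 : Int) : Int :=
  if PySem.Chars.islower c then
    if PySem.Chars.upperChar c = d then max p1 p0 else p0
  else
    if c = d then p1 else 0

-- one iteration of Source B's loop body; state = (prev, has_cased, all_low)
def abbrBStep (bl : List Char) (st : List Int × Bool × Bool) (c : Char) :
    List Int × Bool × Bool :=
  let hasCased := if PySem.Chars.isalpha c then true else st.2.1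
  let allLow := if PySem.Chars.isalpha c then
      (if PySem.Chars.isupper c then false else st.2.2) else st.2.2
  let last : Int := if hasCased ∧ allLow then 1 else 0
  let curr := (bl.zip (st.1.zip st.1.tail)).map (fun p => abbrBEntry c p.1 p.2.1 p.2.2)
  (curr ++ [last], hasCased, allLow)

def abbr_alt (a : String) (b : String) : Int :=
  let bl := b.toList
  let init : List Int × Bool × Bool := (List.replicate bl.length 0 ++ [1], false, true)
  ((a.toList.reverse.foldl (abbrBStep bl) init).1).getD 0 0

-- ===== PRECONDITION & SPEC =====
def Spec_abbr (a : String) (b : String) (out : Int) : Prop := out = abbr_alt a b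
instance (a : String) (b : String) (out : Int) : Decidable (Spec_abbr a b out) := by
  unfold Spec_abbr; infer_instance

-- ===== CLAIM (what is proved, stated in full; the proofs are below) =====
def Claim_equal_abbr : Prop := ∀ (a : String) (b : String), Dom_abbr a b → Spec_abbr a b (abbr a b)

-- ===== LEMMAS AND PROOFS =====

-- the DP row for a given a-suffix s: A's answers against every suffix of bl
def abbrRow (s : List Char) (bl : List Char) : List Int := bl.tails.map (fun t => abbrA s t)

theorem abbrA_nil (b : List Char) : abbrA [] b = if b = [] then 1 else 0 := by
  cases b <;> simp [abbrA, pyStrIslower]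

theorem abbrA_a_nil (a : List Char) :
    abbrA a [] = if pyStrIslower a then 1 else if a = [] then 1 else 0 := by
  cases a with
  | nil => simp [abbrA, pyStrIslower]
  | cons c ar => by_cases h : pyStrIslower (c :: ar) <;> simp [abbrA, h]

theorem abbrA_cons_cons (c d : Char) (ar br : List Char) :
    abbrA (c :: ar) (d :: br) = abbrBEntry c d (abbrA ar (d :: br)) (abbrA ar br) := by
  rw [abbrA]
  simp [abbrBEntry]

theorem tails_self_cons {α : Type} (l : List α) : l.tails = l :: l.tails.tail := by
  cases l <;> simp

theorem abbrRow_nil (bl : List Char) :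
    abbrRow [] bl = List.replicate bl.length 0 ++ [1] := by
  induction bl with
  | nil => simp [abbrRow, abbrA_nil]
  | cons d br ih =>
    simp [abbrRow, abbrA_nil, List.replicate_succ] at ih ⊢
    simpa using ih

theorem abbrRow_cons_head (s : List Char) (bl : List Char) :
    abbrRow s bl = abbrA s bl :: (bl.tails.tail.map (fun t => abbrA s t)) := by
  rw [abbrRow, tails_self_cons bl]; simp

-- the zip-comprehension of one loop iteration produces the next DP row
theorem abbrRow_cons (s : List Char) (d : Char) (br : List Char) :
    abbrRow s (d :: br) = abbrA s (d :: br) :: abbrRow s br := by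
  simp [abbrRow]

-- the zip-comprehension of one loop iteration produces the next DP row
theorem zip_row (c : Char) (s : List Char) (bl : List Char) :
    ((bl.zip ((abbrRow s bl).zip (abbrRow s bl).tail)).map
        (fun p => abbrBEntry c p.1 p.2.1 p.2.2)) ++ [abbrA (c :: s) []]
      = abbrRow (c :: s) bl := by
  induction bl with
  | nil => simp [abbrRow]
  | cons d br ih =>
    obtain ⟨rest, hL⟩ : ∃ rest, abbrRow s br = abbrA s br :: rest :=
      ⟨_, abbrRow_cons_head s br⟩
    rw [hL] at ih
    simp only [List.tail_cons] at ih
    rw [abbrRow_cons s d br, hL, abbrRow_cons (c :: s) d br]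
    simp only [List.tail_cons, List.zip_cons_cons, List.map_cons, List.cons_append]
    rw [abbrA_cons_cons c d s br]
    exact congrArg _ ih

theorem upper_imp_alpha (c : Char) :
    PySem.Chars.isupper c = true → PySem.Chars.isalpha c = true := by
  simp [PySem.Chars.isalpha]; tauto

-- loop invariant: after folding the suffix s of a (taken from the right),
-- the state is (DP row for s, s has a cased char, s has no uppercase char)
theorem fold_inv (bl : List Char) (s : List Char) :
    s.foldr (fun c st => abbrBStep bl st c)
        (List.replicate bl.length 0 ++ [1], false, true)
      = (abbrRow s bl, s.any PySem.Chars.isalpha, s.all (fun c => !PySem.Chars.isupper c)) := by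
  induction s with
  | nil => simp [abbrRow_nil]
  | cons c s ih =>
    rw [List.foldr_cons, ih]
    simp only [abbrBStep]
    have hcased : (if PySem.Chars.isalpha c then true else s.any PySem.Chars.isalpha)
        = (c :: s).any PySem.Chars.isalpha := by
      by_cases h : PySem.Chars.isalpha c <;> simp [h]
    have hlow : (if PySem.Chars.isalpha c then
          (if PySem.Chars.isupper c then false else s.all (fun x => !PySem.Chars.isupper x))
          else s.all (fun x => !PySem.Chars.isupper x))
        = (c :: s).all (fun x => !PySem.Chars.isupper x) := by
      by_cases hu : PySem.Chars.isupper c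
      · simp [hu, upper_imp_alpha c hu]
      · by_cases ha : PySem.Chars.isalpha c <;> simp [ha, hu]
    rw [hcased, hlow]
    have hlast : (if ((c :: s).any PySem.Chars.isalpha
            ∧ (c :: s).all (fun x => !PySem.Chars.isupper x)) then (1 : Int) else 0)
        = abbrA (c :: s) [] := by
      rw [abbrA_a_nil]
      by_cases h1 : (c :: s).any PySem.Chars.isalpha <;>
        by_cases h2 : (c :: s).all (fun x => !PySem.Chars.isupper x) <;>
          simp [pyStrIslower, h1, h2]
    rw [hlast]
    simp only [Prod.mk.injEq, and_true]
    exact zip_row c s bl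

theorem abbrRow_head (s bl : List Char) : (abbrRow s bl).getD 0 0 = abbrA s bl := by
  rw [abbrRow_cons_head]; rfl

-- ===== VERDICT (by name: the statement is the Claim_ definition above) =====
theorem abbr_spec : Claim_equal_abbr := by
  intro a b _
  unfold Spec_abbr abbr abbr_alt
  show abbrA a.toList b.toList
      = ((a.toList.reverse.foldl (abbrBStep b.toList)
          (List.replicate b.toList.length 0 ++ [1], false, true)).1).getD 0 0
  rw [List.foldl_reverse, fold_inv b.toList a.toList]
  exact (abbrRow_head a.toList b.toList).symm
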